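-- pv_equiv track=rewrite | github.com/VirtuosoChris/VirtuosoTile | TileCompiler/atlascompiler.py | count_paren_parity
-- ===== SOURCE A (Python) =====
-- def count_paren_parity(strin):
-- 	n=0
-- 	for s in strin:
-- 		if(s==')'):
-- 			n-=1
-- 		if(s=='('):
-- 			n+=1
-- 	return n
-- ===== SOURCE B (Python) =====
-- def count_paren_parity(strin):
-- 	# Divide and conquer: balance is additive over concatenation, so recurse on halves.
-- 	def bal(lo, hi):
-- 		if hi - lo == 0:
-- 			return 0
-- 		if hi - lo == 1:
-- 			c = strin[lo]
-- 			return 1 if c == '(' else (-1 if c == ')' else 0)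
-- 		mid = (lo + hi) // 2
-- 		return bal(lo, mid) + bal(mid, hi)
-- 	return bal(0, len(strin))
-- ===== Notes on version B (the rewrite author's own statement) =====
-- stated objective: alternative
-- what changed: Replaces the single-pass running-balance accumulator loop with a divide-and-conquer recursion that splits the index range in half and adds the balances of the halves (balance is additive over concatenation).
import Mathlib
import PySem

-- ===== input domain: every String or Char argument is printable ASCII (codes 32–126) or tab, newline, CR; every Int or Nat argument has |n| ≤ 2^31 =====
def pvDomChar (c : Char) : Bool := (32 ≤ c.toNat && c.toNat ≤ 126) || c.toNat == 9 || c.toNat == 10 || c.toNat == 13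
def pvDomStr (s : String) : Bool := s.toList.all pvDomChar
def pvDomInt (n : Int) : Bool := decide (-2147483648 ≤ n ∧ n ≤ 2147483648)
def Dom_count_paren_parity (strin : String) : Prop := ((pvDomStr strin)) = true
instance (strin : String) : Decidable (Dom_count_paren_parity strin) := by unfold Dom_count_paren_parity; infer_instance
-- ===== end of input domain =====

-- B replaces A's single-pass running-balance loop with a divide-and-conquer recursion on
-- index ranges (balance is additive over concatenation); same result, not claimed faster.
-- ===== PORT A =====
def count_paren_parity (strin : String) : Int :=
  strin.toList.foldl (fun n s =>
    let n := if s == ')' then n - 1 else n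
    if s == '(' then n + 1 else n) 0

-- ===== PORT B =====
-- bal(lo, hi) of Source B; lo, hi are always ≥ 0 in B (derived from 0 and len), so Nat indices.
-- The extra `fuel` argument (always ≥ hi - lo at every call) is only a structural-recursion
-- totality guard; it never changes the computed value.
def pvBal (l : List Char) : Nat → Nat → Nat → Int
  | 0, _, _ => 0   -- reached only with hi - lo = 0, i.e. Python's first base case
  | fuel + 1, lo, hi =>
    if hi - lo = 0 then 0
    else if hi - lo = 1 then
      match PySem.List.pyGet? l (lo : Int) with
      | some c => if c == '(' then 1 else if c == ')' then -1 else 0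
      | none => 0   -- unreachable in B: 0 ≤ lo < hi ≤ l.length
    else
      pvBal l fuel lo ((lo + hi) / 2) + pvBal l fuel ((lo + hi) / 2) hi

def count_paren_parity_alt (strin : String) : Int :=
  pvBal strin.toList strin.toList.length 0 strin.toList.length

-- ===== PRECONDITION & SPEC =====
def Spec_count_paren_parity (strin : String) (out : Int) : Prop := out = count_paren_parity_alt strin
instance (strin : String) (out : Int) : Decidable (Spec_count_paren_parity strin out) := by unfold Spec_count_paren_parity; infer_instance

-- ===== CLAIM (what is proved, stated in full; the proofs are below) =====
def Claim_equal_count_paren_parity : Prop := ∀ (strin : String), Dom_count_paren_parity strin → Spec_count_paren_parity strin (count_paren_parity strin)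

-- ===== LEMMAS AND PROOFS =====

-- per-character weight and its indexed version
def pvW (c : Char) : Int := if c = '(' then 1 else if c = ')' then -1 else 0

def pvWC (l : List Char) (i : Nat) : Int :=
  match l[i]? with
  | some c => pvW c
  | none => 0

theorem pvBal_eq_sum (l : List Char) : ∀ (fuel lo hi : Nat), hi - lo ≤ fuel →
    pvBal l fuel lo hi = ∑ i ∈ Finset.Ico lo hi, pvWC l i := by
  intro fuel
  induction fuel with
  | zero =>
    intro lo hi h
    rw [pvBal, Finset.Ico_eq_empty (by omega)]
    simp
  | succ k ih =>
    intro lo hi h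
    rw [pvBal]
    split_ifs with h0 h1
    · rw [Finset.Ico_eq_empty (by omega)]; simp
    · have hhi : hi = lo + 1 := by omega
      subst hhi
      rw [Finset.sum_Ico_eq_sum_range]
      simp only [Nat.add_sub_cancel_left, Finset.sum_range_one, Nat.add_zero]
      rw [PySem.List.pyGet?_natCast]
      unfold pvWC pvW
      cases l[lo]? with
      | none => rfl
      | some c => by_cases hc1 : c = '(' <;> by_cases hc2 : c = ')' <;> simp_all
    · rw [ih lo ((lo + hi) / 2) (by omega), ih ((lo + hi) / 2) hi (by omega)]
      exact Finset.sum_Ico_consecutive _ (by omega) (by omega)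

theorem sum_wc_eq_counts (l : List Char) :
    (∑ i ∈ Finset.Ico 0 l.length, pvWC l i)
      = (l.count '(' : Int) - (l.count ')' : Int) := by
  induction l using List.reverseRecOn with
  | nil => simp
  | append_singleton t c ih =>
    rw [Finset.sum_Ico_eq_sum_range] at *
    simp only [Nat.sub_zero, Nat.zero_add, List.length_append, List.length_cons,
      List.length_nil] at *
    rw [Finset.sum_range_succ]
    have hmid : ∀ i ∈ Finset.range t.length, pvWC (t ++ [c]) i = pvWC t i := by
      intro i hi
      simp only [Finset.mem_range] at hi
      unfold pvWC
      rw [List.getElem?_append_left hi]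
    rw [Finset.sum_congr rfl hmid, ih]
    have hlast : pvWC (t ++ [c]) t.length = pvW c := by
      unfold pvWC
      rw [List.getElem?_append_right le_rfl]
      simp
    rw [hlast]
    simp only [List.count_append, List.count_singleton]
    unfold pvW
    by_cases h1 : c = '(' <;> by_cases h2 : c = ')' <;> simp_all <;> omega

theorem fold_eq_counts (l : List Char) (n : Int) :
    l.foldl (fun n s =>
      let n := if s == ')' then n - 1 else n
      if s == '(' then n + 1 else n) n
    = n + (l.count '(' : Int) - (l.count ')' : Int) := by
  induction l generalizing n with
  | nil => simp
  | cons x t ih =>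
    simp only [List.foldl_cons, ih, List.count_cons]
    by_cases h1 : x = '(' <;> by_cases h2 : x = ')' <;> simp_all <;> omega

-- ===== VERDICT (by name: the statement is the Claim_ definition above) =====
theorem count_paren_parity_spec : Claim_equal_count_paren_parity := by
  intro strin _
  unfold Spec_count_paren_parity count_paren_parity count_paren_parity_alt
  rw [fold_eq_counts, pvBal_eq_sum _ _ _ _ (by omega), sum_wc_eq_counts]
  ring
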